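-- pv_equiv track=rewrite | github.com/Wanderfel/Posfixa | pos_fixa.py | __substitui_char
-- ===== SOURCE A (Python) =====
-- def __substitui_char(expressao):
--     var = expressao.replace(' ','')
--     var = list(var)
--     lista_aux = []
--     contador = 0
--     descontador = 0
--
--     for i in range(len(var)):
--
--         if var[i] == '*' and var[i] == var[i + 1]:
--             var[i] +='*'
--             aux = i + 1
--             lista_aux.append(aux)
--
--     while contador != len(lista_aux):
--         del var[lista_aux[contador]-descontador]
--         contador += 1
--         descontador += 1
--
--     return var
-- ===== SOURCE B (Python) =====
-- def __substitui_char(expressao):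
--     s = expressao.replace(' ', '')
--     out = []
--     i, n = 0, len(s)
--     while i < n:
--         if s[i] == '*':
--             j = i + 1
--             while j < n and s[j] == '*':
--                 j += 1
--             out.append('**' if j - i >= 2 else '*')
--             i = j
--         else:
--             out.append(s[i])
--             i += 1
--     return out
-- ===== Notes on version B (the rewrite author's own statement) =====
-- stated objective: simpler
-- what changed: B replaces A's three-phase scheme (mutate chars in place while recording marked indices, then a second loop deleting marked positions with a shift counter) by one forward run-scanning pass that appends '**' for a star run of length >= 2, '*' for a lone star and each other char directly.
-- outside the precondition, e.g. on __substitui_char('*'): A raises IndexError, B returns ['*']; on __substitui_char('**'): A raises IndexError, B returns ['**']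
import Mathlib
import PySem

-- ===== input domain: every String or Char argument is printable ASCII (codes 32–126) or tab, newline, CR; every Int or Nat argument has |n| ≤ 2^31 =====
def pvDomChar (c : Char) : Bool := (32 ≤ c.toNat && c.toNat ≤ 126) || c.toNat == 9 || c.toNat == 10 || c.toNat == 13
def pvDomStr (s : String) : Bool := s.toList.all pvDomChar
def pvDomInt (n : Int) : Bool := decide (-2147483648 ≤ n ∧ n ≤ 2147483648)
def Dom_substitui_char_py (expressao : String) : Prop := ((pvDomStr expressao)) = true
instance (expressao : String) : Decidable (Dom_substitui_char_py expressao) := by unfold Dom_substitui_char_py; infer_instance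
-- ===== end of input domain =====

-- B replaces A's mark-then-delete two-phase index scheme by one run-scanning pass (objective: simpler).
-- A raises IndexError when the space-stripped input ends in '*'; those inputs are outside Pre_.

-- ===== PORT A =====
-- marking loop: for i in range(len(var)): if var[i]=='*' and var[i]==var[i+1]: var[i]+='*'; lista_aux.append(i+1)
-- var[i] with i < len never raises, so it is read with a proof; var[i+1] is read with pyGet?-style
-- lookup ([·]?) whose none = Python's IndexError, propagated as none.
def pvALoop (var : List String) (laux : List Nat) (i : Nat) : Option (List String × List Nat) :=
  if h : i < var.length then
    if var[i] = "*" then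
      match var[i+1]? with
      | none => none   -- IndexError in Python
      | some w =>
        if var[i] = w then pvALoop (var.set i "**") (laux ++ [i+1]) (i+1)
        else pvALoop var laux (i+1)
    else pvALoop var laux (i+1)
  else some (var, laux)
  termination_by var.length - i
  decreasing_by all_goals first | omega | (simp [List.length_set]; omega)

-- deletion loop: while contador != len(lista_aux): del var[lista_aux[contador]-descontador]; …
-- contador walks lista_aux front to back; desc is the number of deletions done so far.
-- Python's subtraction stays ≥ 1 on every reachable state (marks are strictly increasing, entry > desc),
-- so Nat subtraction is exact there; an out-of-range del (never reached inside Pre_) is none.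
def pvDLoop (var : List String) (marks : List Nat) (desc : Nat) : Option (List String) :=
  match marks with
  | [] => some var
  | p :: rest =>
    let j := p - desc
    if j < var.length then pvDLoop (var.eraseIdx j) rest (desc + 1) else none

def substitui_char_py (expressao : String) : List String :=
  let var : List String := ((PySem.Str.replace expressao " " "").toList).map (fun c => String.ofList [c])
  match pvALoop var [] 0 with
  | none => []          -- unreachable inside Pre_ (Python raises IndexError here)
  | some (v, marks) => (pvDLoop v marks 0).getD []   -- getD unreachable inside Pre_

-- ===== PORT B =====
-- single forward pass: a run of ≥ 2 stars emits '**', a lone star '*', any other char itself.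
def pvBGo : List Char → List String
  | [] => []
  | c :: rest =>
    if c = '*' then
      let k := (rest.takeWhile (fun d => d = '*')).length
      (if 1 ≤ k then "**" else "*") :: pvBGo (rest.drop k)
    else String.ofList [c] :: pvBGo rest
  termination_by l => l.length
  decreasing_by all_goals (simp [List.length_drop]; try omega)

def substitui_char_py_alt (expressao : String) : List String :=
  pvBGo (PySem.Str.replace expressao " " "").toList

-- ===== PRECONDITION & SPEC =====
-- Pre_ excludes exactly the inputs on which A raises IndexError: space-stripped string ending in '*'.
def Pre_substitui_char_py (expressao : String) : Prop :=
  ((PySem.Str.replace expressao " " "").toList).getLast? ≠ some '*'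
instance (expressao : String) : Decidable (Pre_substitui_char_py expressao) := by
  unfold Pre_substitui_char_py; infer_instance

def pvWitness_substitui_char_py : String := "a ** b"

def Spec_substitui_char_py (expressao : String) (out : List String) : Prop := out = substitui_char_py_alt expressao
instance (expressao : String) (out : List String) : Decidable (Spec_substitui_char_py expressao out) := by unfold Spec_substitui_char_py; infer_instance

-- ===== CLAIM (what is proved, stated in full; the proofs are below) =====
def Claim_equal_substitui_char_py : Prop := ∀ (expressao : String), Dom_substitui_char_py expressao → Pre_substitui_char_py expressao → Spec_substitui_char_py expressao (substitui_char_py expressao)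
-- ===== LEMMAS AND PROOFS =====

-- structural reformulation of the marking loop on the unprocessed suffix
def pvG (i : Nat) : List String → Option (List String × List Nat)
  | [] => some ([], [])
  | v :: rest =>
    if v = "*" then
      match rest.head? with
      | none => none
      | some w =>
        if w = "*" then (pvG (i+1) rest).map (fun lm => ("**" :: lm.1, (i+1) :: lm.2))
        else (pvG (i+1) rest).map (fun lm => (v :: lm.1, lm.2))
    else (pvG (i+1) rest).map (fun lm => (v :: lm.1, lm.2))

-- one-step unfolding of pvG on a cons cell
theorem pvG_cons (i : Nat) (v : String) (rest : List String) :
    pvG i (v :: rest) =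
      (if v = "*" then
        match rest.head? with
        | none => none
        | some w =>
          if w = "*" then (pvG (i+1) rest).map (fun lm => ("**" :: lm.1, (i+1) :: lm.2))
          else (pvG (i+1) rest).map (fun lm => (v :: lm.1, lm.2))
      else (pvG (i+1) rest).map (fun lm => (v :: lm.1, lm.2))) := rfl

-- fully-reduced unfoldings for a concrete head
theorem pvG_singleton (i : Nat) (v : String) :
    pvG i [v] = if v = "*" then none else some ([v], []) := rfl

theorem pvG_cons_cons (i : Nat) (v w : String) (rest : List String) :
    pvG i (v :: w :: rest) =
      (if v = "*" then
        (if w = "*" then (pvG (i+1) (w :: rest)).map (fun lm => ("**" :: lm.1, (i+1) :: lm.2))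
         else (pvG (i+1) (w :: rest)).map (fun lm => (v :: lm.1, lm.2)))
      else (pvG (i+1) (w :: rest)).map (fun lm => (v :: lm.1, lm.2))) := rfl

theorem pv_take_set (l : List String) (k : Nat) (a : String) (h : k < l.length) :
    (l.set k a).take (k+1) = l.take k ++ [a] := by
  rw [List.set_eq_take_append_cons_drop, if_pos h, List.take_append]
  simp [List.length_take, Nat.min_eq_left (Nat.le_of_lt h), List.take_of_length_le]

theorem pvALoop_eq_pvG (var : List String) (laux : List Nat) (k : Nat) :
    pvALoop var laux k =
      (pvG k (var.drop k)).map (fun lm => (var.take k ++ lm.1, laux ++ lm.2)) := by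
  have key : ∀ n (var : List String) (laux : List Nat) (k : Nat), var.length - k = n →
      pvALoop var laux k =
        (pvG k (var.drop k)).map (fun lm => (var.take k ++ lm.1, laux ++ lm.2)) := by
    intro n
    induction n with
    | zero =>
      intro var laux k hn
      have hk : var.length ≤ k := by omega
      rw [pvALoop, dif_neg (by omega), List.drop_of_length_le hk, pvG,
        List.take_of_length_le hk]
      simp
    | succ n ih =>
      intro var laux k hn
      have hk : k < var.length := by omega
      have hdrop : var.drop k = var[k] :: var.drop (k+1) := List.drop_eq_getElem_cons hk
      have htake : var.take (k+1) = var.take k ++ [var[k]] := by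
        rw [List.take_add_one]; simp [List.getElem?_eq_getElem hk]
      rw [pvALoop, dif_pos hk, hdrop, pvG_cons]
      by_cases hv : var[k] = "*"
      · rw [if_pos hv, if_pos hv, List.head?_drop]
        cases hw : var[k+1]? with
        | none => simp
        | some w =>
          simp only
          by_cases hws : w = "*"
          · rw [if_pos (hv.trans hws.symm), if_pos hws]
            rw [ih (var.set k "**") (laux ++ [k+1]) (k+1) (by simp; omega)]
            have h1 : (var.set k "**").drop (k+1) = var.drop (k+1) := by
              rw [List.drop_set]; simp
            have h2 : (var.set k "**").take (k+1) = var.take k ++ ["**"] :=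
              pv_take_set var k "**" hk
            rw [h1, h2]
            cases pvG (k+1) (var.drop (k+1)) with
            | none => simp
            | some lm => simp
          · rw [if_neg (fun hh : var[k] = w => hws (hh.symm.trans hv)), if_neg hws]
            rw [ih var laux (k+1) (by omega), htake]
            cases pvG (k+1) (var.drop (k+1)) with
            | none => simp
            | some lm => simp [hv]
      · rw [if_neg hv, if_neg hv, ih var laux (k+1) (by omega), htake]
        cases pvG (k+1) (var.drop (k+1)) with
        | none => simp
        | some lm =>
          simp only [Option.map_some, Option.some.injEq, Prod.mk.injEq]
          refine ⟨?_, trivial⟩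
          rw [List.append_assoc]
          rfl
  exact key (var.length - k) var laux k rfl

theorem pvG_len {i : Nat} {S l : List String} {m : List Nat}
    (h : pvG i S = some (l, m)) : l.length = S.length := by
  induction S generalizing i l m with
  | nil =>
    simp only [pvG, Option.some.injEq] at h
    injection h with h1 h2
    simp [← h1]
  | cons v rest ih =>
    simp only [pvG] at h
    split at h
    · split at h
      · exact absurd h (by simp)
      · split at h
        all_goals
          rw [Option.map_eq_some_iff] at h
          obtain ⟨⟨l', m'⟩, hg, he⟩ := h
          simp only at he
          rw [Prod.mk.injEq] at he
          obtain ⟨he1, he2⟩ := he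
          subst he1
          simp [ih hg]
    · rw [Option.map_eq_some_iff] at h
      obtain ⟨⟨l', m'⟩, hg, he⟩ := h
      simp only at he
      rw [Prod.mk.injEq] at he
      obtain ⟨he1, he2⟩ := he
      subst he1
      simp [ih hg]

theorem pvG_marks {i : Nat} {S l : List String} {m : List Nat}
    (h : pvG i S = some (l, m)) : m.Pairwise (· < ·) ∧ ∀ p ∈ m, i < p := by
  induction S generalizing i l m with
  | nil =>
    simp only [pvG, Option.some.injEq] at h
    injection h with h1 h2
    rw [← h2]
    simp
  | cons v rest ih =>
    simp only [pvG] at h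
    split at h
    · split at h
      · exact absurd h (by simp)
      · split at h
        · rw [Option.map_eq_some_iff] at h
          obtain ⟨⟨l', m'⟩, hg, he⟩ := h
          simp only at he
          rw [Prod.mk.injEq] at he
          obtain ⟨he1, he2⟩ := he
          subst he2
          obtain ⟨hp, hb⟩ := ih hg
          constructor
          · exact List.pairwise_cons.mpr ⟨fun q hq => hb q hq, hp⟩
          · intro p hp'
            rcases List.mem_cons.mp hp' with h1 | h1
            · omega
            · have := hb p h1; omega
        · rw [Option.map_eq_some_iff] at h
          obtain ⟨⟨l', m'⟩, hg, he⟩ := h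
          simp only at he
          rw [Prod.mk.injEq] at he
          obtain ⟨he1, he2⟩ := he
          subst he2
          obtain ⟨hp, hb⟩ := ih hg
          exact ⟨hp, fun p h1 => by have := hb p h1; omega⟩
    · rw [Option.map_eq_some_iff] at h
      obtain ⟨⟨l', m'⟩, hg, he⟩ := h
      simp only at he
      rw [Prod.mk.injEq] at he
      obtain ⟨he1, he2⟩ := he
      subst he2
      obtain ⟨hp, hb⟩ := ih hg
      exact ⟨hp, fun p h1 => by have := hb p h1; omega⟩

theorem pvDLoop_cons (x : String) (l : List String) (m : List Nat) (c : Nat)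
    (hm : ∀ p ∈ m, c < p) (hp : m.Pairwise (· < ·)) :
    pvDLoop (x :: l) m c = (pvDLoop l m (c+1)).map (x :: ·) := by
  induction m generalizing x l c with
  | nil => simp [pvDLoop]
  | cons p rest ih =>
    have hcp : c < p := hm p (List.mem_cons_self)
    have hrest : ∀ q ∈ rest, c + 1 < q := by
      intro q hq
      have h1 := (List.pairwise_cons.mp hp).1 q hq
      omega
    have hperase : rest.Pairwise (· < ·) := (List.pairwise_cons.mp hp).2
    simp only [pvDLoop]
    have hj : p - c = (p - (c+1)) + 1 := by omega
    have herase : (x :: l).eraseIdx (p - c) = x :: l.eraseIdx (p - (c+1)) := by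
      rw [hj]; simp
    rw [herase, hj]
    by_cases hlt : p - (c+1) < l.length
    · rw [if_pos (by simp; omega), if_pos hlt]
      exact ih x (l.eraseIdx (p - (c+1))) (c+1) hrest hperase
    · rw [if_neg (by simp; omega), if_neg hlt]
      simp

theorem pv_star_iff (c : Char) : String.ofList [c] = "*" ↔ c = '*' := by
  constructor
  · intro h
    have := congrArg String.toList h
    simpa using this
  · intro h; rw [h]

theorem pvG_isSome (c : Nat) (s : List Char) (hs : s.getLast? ≠ some '*') :
    ∃ l m, pvG c (s.map (fun ch => String.ofList [ch])) = some (l, m) := by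
  induction s generalizing c with
  | nil => exact ⟨[], [], rfl⟩
  | cons c0 t ih =>
    cases t with
    | nil =>
      have hc0 : c0 ≠ '*' := by
        intro h; exact hs (by simp [h])
      refine ⟨[String.ofList [c0]], [], ?_⟩
      rw [List.map_cons, List.map_nil, pvG_singleton]
      rw [if_neg (fun h => hc0 ((pv_star_iff c0).mp h))]
    | cons c1 t' =>
      have htail : (c1 :: t').getLast? ≠ some '*' := by
        intro h; exact hs (by rwa [List.getLast?_cons_cons])
      obtain ⟨l', m', hg⟩ := ih (c + 1) htail
      rw [List.map_cons, List.map_cons, pvG_cons_cons]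
      rw [List.map_cons] at hg
      by_cases h0 : c0 = '*'
      · rw [if_pos ((pv_star_iff c0).mpr h0)]
        by_cases h1 : c1 = '*'
        · rw [if_pos ((pv_star_iff c1).mpr h1), hg]
          exact ⟨_, _, rfl⟩
        · rw [if_neg (fun h => h1 ((pv_star_iff c1).mp h)), hg]
          exact ⟨_, _, rfl⟩
      · rw [if_neg (fun h => h0 ((pv_star_iff c0).mp h)), hg]
        exact ⟨_, _, rfl⟩

theorem pvMain (s : List Char) (c : Nat) (l : List String) (m : List Nat)
    (h : pvG c (s.map (fun ch => String.ofList [ch])) = some (l, m)) :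
    pvDLoop l m c = some (pvBGo s) := by
  induction s generalizing c l m with
  | nil =>
    rw [List.map_nil] at h
    simp only [pvG, Option.some.injEq] at h
    injection h with h1 h2
    rw [← h1, ← h2]
    simp [pvDLoop, pvBGo]
  | cons c0 t ih =>
    by_cases h0 : c0 = '*'
    · cases t with
      | nil =>
        rw [List.map_cons, List.map_nil, pvG_singleton,
          if_pos ((pv_star_iff c0).mpr h0)] at h
        exact absurd h (by simp)
      | cons c1 t' =>
        rw [List.map_cons, List.map_cons, pvG_cons_cons,
          if_pos ((pv_star_iff c0).mpr h0)] at h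
        by_cases h1 : c1 = '*'
        · -- run of at least two stars
          rw [if_pos ((pv_star_iff c1).mpr h1)] at h
          rw [Option.map_eq_some_iff] at h
          obtain ⟨⟨l', m'⟩, hg, he⟩ := h
          simp only at he
          rw [Prod.mk.injEq] at he
          obtain ⟨he1, he2⟩ := he
          have hg2 : pvG (c+1) ((c1 :: t').map (fun ch => String.ofList [ch])) = some (l', m') := by
            rw [List.map_cons]; exact hg
          have hlen : l'.length = t'.length + 1 := by
            have := pvG_len hg2; simpa using this
          obtain ⟨v1, l'', rfl⟩ : ∃ v1 l'', l' = v1 :: l'' := by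
            cases l' with
            | nil => simp at hlen
            | cons a b => exact ⟨a, b, rfl⟩
          obtain ⟨hpw, hbd⟩ := pvG_marks hg2
          have hih := ih (c+1) (v1 :: l'') m' hg2
          rw [pvDLoop_cons v1 l'' m' (c+1) hbd hpw] at hih
          rw [Option.map_eq_some_iff] at hih
          obtain ⟨w, hw, hvw⟩ := hih
          -- compute the first deletion step
          rw [← he1, ← he2]
          simp only [pvDLoop]
          rw [if_pos (by simp only [List.length_cons]; omega)]
          have herase : ("**" :: v1 :: l'').eraseIdx (c + 1 - c) = "**" :: l'' := by
            have hc1 : c + 1 - c = 1 := by omega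
            rw [hc1]; simp
          rw [herase]
          rw [pvDLoop_cons "**" l'' m' (c+1) hbd hpw, hw]
          -- identify pvBGo values
          have hBGo2 : pvBGo ('*' :: '*' :: t') = "**" :: (pvBGo ('*' :: t')).tail := by
            rw [pvBGo, pvBGo]
            simp [h1]
          rw [h0, h1] at *
          rw [hBGo2, ← hvw]
          simp
        · -- lone star followed by a non-star
          rw [if_neg (fun hh => h1 ((pv_star_iff c1).mp hh))] at h
          rw [Option.map_eq_some_iff] at h
          obtain ⟨⟨l', m'⟩, hg, he⟩ := h
          simp only at he
          rw [Prod.mk.injEq] at he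
          obtain ⟨he1, he2⟩ := he
          have hg2 : pvG (c+1) ((c1 :: t').map (fun ch => String.ofList [ch])) = some (l', m') := by
            rw [List.map_cons]; exact hg
          obtain ⟨hpw, hbd⟩ := pvG_marks hg2
          have hih := ih (c+1) l' m' hg2
          rw [← he1, ← he2]
          rw [pvDLoop_cons _ l' m' c (fun p hp => by have := hbd p hp; omega) hpw, hih]
          have hBGo : pvBGo ('*' :: c1 :: t') = "*" :: pvBGo (c1 :: t') := by
            rw [pvBGo]
            simp [h1]
          rw [h0] at *
          rw [hBGo]
          simp
    · -- non-star head
      cases t with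
      | nil =>
        rw [List.map_cons, List.map_nil, pvG_singleton,
          if_neg (fun hh => h0 ((pv_star_iff c0).mp hh))] at h
        injection h with h'
        injection h' with h1 h2
        rw [← h1, ← h2]
        have hBGo : pvBGo [c0] = [String.ofList [c0]] := by
          rw [pvBGo]
          simp [h0, pvBGo]
        rw [hBGo]
        simp [pvDLoop]
      | cons c1 t' =>
        rw [List.map_cons, List.map_cons, pvG_cons_cons,
          if_neg (fun hh => h0 ((pv_star_iff c0).mp hh))] at h
        rw [Option.map_eq_some_iff] at h
        obtain ⟨⟨l', m'⟩, hg, he⟩ := h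
        simp only at he
        rw [Prod.mk.injEq] at he
        obtain ⟨he1, he2⟩ := he
        have hg2 : pvG (c+1) ((c1 :: t').map (fun ch => String.ofList [ch])) = some (l', m') := by
          rw [List.map_cons]; exact hg
        obtain ⟨hpw, hbd⟩ := pvG_marks hg2
        have hih := ih (c+1) l' m' hg2
        rw [← he1, ← he2]
        rw [pvDLoop_cons _ l' m' c (fun p hp => by have := hbd p hp; omega) hpw, hih]
        have hBGo : pvBGo (c0 :: c1 :: t') = String.ofList [c0] :: pvBGo (c1 :: t') := by
          rw [pvBGo]
          simp [h0]
        rw [hBGo]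
        simp

-- ===== VERDICT (by name: the statement is the Claim_ definition above) =====
theorem substitui_char_py_spec : Claim_equal_substitui_char_py := by
  intro e _ hpre
  unfold Spec_substitui_char_py substitui_char_py substitui_char_py_alt
  set s := (PySem.Str.replace e " " "").toList with hsdef
  obtain ⟨l, m, hg⟩ := pvG_isSome 0 s hpre
  have ha := pvALoop_eq_pvG (s.map (fun c => String.ofList [c])) [] 0
  simp only [List.drop_zero, List.take_zero, List.nil_append] at ha
  rw [hg] at ha
  simp only [Option.map_some] at ha
  simp only [ha, pvMain s 0 l m hg, Option.getD_some]
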